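-- pv_equiv track=rewrite | github.com/calkan27/HUNL | hunl/engine/poker_utils.py | _tokenize_ws
-- ===== SOURCE A (Python) =====
-- def _tokenize_ws(s):
-- 	ws = {9, 10, 11, 12, 13, 32}
-- 	out = []
-- 	cur = ""
-- 	try:
-- 		it = iter(s)
-- 	except Exception:
-- 		it = iter(str(s))
-- 	for ch in it:
-- 		ok = True
-- 		try:
-- 			oc = ord(ch)
-- 			if oc in ws:
-- 				ok = False
-- 		except Exception:
-- 			ok = True
-- 		if ok:
-- 			cur = cur + ch
-- 		else:
-- 			if cur:
-- 				out.append(cur)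
-- 				cur = ""
-- 	if cur:
-- 		out.append(cur)
-- 	return out
-- ===== SOURCE B (Python) =====
-- def _tokenize_ws(s):
--     try:
--         chars = list(iter(s))
--     except Exception:
--         chars = list(str(s))
--
--     def is_ws(ch):
--         try:
--             return ord(ch) in (9, 10, 11, 12, 13, 32)
--         except Exception:
--             return False
--
--     out = []
--     i, n = 0, len(chars)
--     while i < n:
--         if is_ws(chars[i]):
--             i += 1
--             continue
--         j = i
--         while j < n and not is_ws(chars[j]):
--             j += 1
--         out.append("".join(chars[i:j]))
--         i = j
--     return out
-- ===== Notes on version B (the rewrite author's own statement) =====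
-- stated objective: alternative
-- what changed: B replaces A's stateful character-accumulator loop with a two-pointer run scanner: it skips whitespace, finds the end of each non-whitespace run, and joins that run in one step.
import Mathlib
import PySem

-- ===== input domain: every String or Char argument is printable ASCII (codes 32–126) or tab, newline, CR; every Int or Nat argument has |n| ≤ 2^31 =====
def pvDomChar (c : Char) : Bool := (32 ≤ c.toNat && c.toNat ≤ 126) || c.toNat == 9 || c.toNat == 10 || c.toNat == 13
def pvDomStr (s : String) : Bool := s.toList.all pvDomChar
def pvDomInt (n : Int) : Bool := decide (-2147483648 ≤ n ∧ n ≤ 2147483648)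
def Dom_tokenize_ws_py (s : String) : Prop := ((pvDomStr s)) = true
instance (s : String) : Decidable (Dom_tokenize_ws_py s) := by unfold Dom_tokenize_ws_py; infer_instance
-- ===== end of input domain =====

-- B tokenizes by scanning maximal non-whitespace runs (two-pointer style) instead of A's
-- per-character accumulator loop; same return value (objective: alternative decomposition).

-- ===== PORT A =====
-- A's ws = {9,10,11,12,13,32}; 'oc in ws' ported as membership in the literal list
def tokWsLoopA : List Char → String → List String → List String
  | [], cur, out => if cur ≠ "" then out ++ [cur] else out
  | ch :: rest, cur, out =>
    -- ok = True; if ord(ch) in ws: ok = False  (ord never raises on a Char)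
    if ([9, 10, 11, 12, 13, 32] : List Nat).contains ch.toNat then
      if cur ≠ "" then tokWsLoopA rest "" (out ++ [cur]) else tokWsLoopA rest "" out
    else
      tokWsLoopA rest (cur.push ch) out

def tokenize_ws_py (s : String) : List String := tokWsLoopA s.toList "" []

-- ===== PORT B =====
def isWsB (c : Char) : Bool := ([9, 10, 11, 12, 13, 32] : List Nat).contains c.toNat

-- Source B's outer while: skip a whitespace char, or emit the maximal non-ws run ("".join(chars[i:j]))
def tokWsB : List Char → List String
  | [] => []
  | c :: rest =>
    if isWsB c then tokWsB rest
    else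
      String.ofList ((c :: rest).takeWhile (fun x => !isWsB x))
        :: tokWsB ((c :: rest).dropWhile (fun x => !isWsB x))
termination_by cs => cs.length
decreasing_by
  · exact Nat.lt_succ_self _
  · simp only [List.dropWhile_cons, Bool.not_eq_true', *]
    simp only [List.length_cons]
    exact Nat.lt_succ_of_le (List.length_dropWhile_le _ _)

def tokenize_ws_py_alt (s : String) : List String := tokWsB s.toList

-- ===== PRECONDITION & SPEC =====
def Spec_tokenize_ws_py (s : String) (out : List String) : Prop := out = tokenize_ws_py_alt s
instance (s : String) (out : List String) : Decidable (Spec_tokenize_ws_py s out) := by unfold Spec_tokenize_ws_py; infer_instance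

-- ===== CLAIM (what is proved, stated in full; the proofs are below) =====
def Claim_equal_tokenize_ws_py : Prop := ∀ (s : String), Dom_tokenize_ws_py s → Spec_tokenize_ws_py s (tokenize_ws_py s)

-- ===== LEMMAS AND PROOFS =====

def flushIf (t : List Char) : List String := if t = [] then [] else [String.ofList t]

theorem loopA_cons (c : Char) (rest : List Char) (cur : String) (out : List String) :
    tokWsLoopA (c :: rest) cur out =
      if isWsB c then
        (if cur ≠ "" then tokWsLoopA rest "" (out ++ [cur]) else tokWsLoopA rest "" out)
      else tokWsLoopA rest (cur.push c) out := rfl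

theorem tokWsB_unfold (cs : List Char) :
    tokWsB cs = flushIf (cs.takeWhile (fun x => !isWsB x)) ++ tokWsB (cs.dropWhile (fun x => !isWsB x)) := by
  cases cs with
  | nil => simp [tokWsB, flushIf]
  | cons c rest =>
    by_cases h : isWsB c
    · simp [tokWsB, h, flushIf]
    · simp [tokWsB, h, flushIf]

theorem loopA_eq (cs : List Char) : ∀ (cur : String) (out : List String),
    tokWsLoopA cs cur out =
      out ++ flushIf (cur.toList ++ cs.takeWhile (fun x => !isWsB x))
          ++ tokWsB (cs.dropWhile (fun x => !isWsB x)) := by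
  induction cs with
  | nil =>
    intro cur out
    by_cases hc : cur = ""
    · simp [tokWsLoopA, hc, flushIf, tokWsB]
    · have ht : cur.toList ≠ [] := by
        simpa [String.toList_eq_nil_iff] using hc
      simp [tokWsLoopA, hc, flushIf, ht, tokWsB, String.ofList_toList]
  | cons c rest ih =>
    intro cur out
    by_cases h : isWsB c
    · rw [loopA_cons, if_pos h]
      have hB : tokWsB (c :: rest) = tokWsB rest := by simp [tokWsB, h]
      have key : ∀ out' : List String, tokWsLoopA rest "" out' = out' ++ tokWsB rest := by
        intro out'
        rw [ih "" out']
        rw [tokWsB_unfold rest]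
        simp
      by_cases hc : cur = ""
      · simp only [hc, ne_eq, not_true_eq_false, if_false, key]
        simp [flushIf, h, hB]
      · have ht : cur.toList ≠ [] := by
          simpa [String.toList_eq_nil_iff] using hc
        simp only [ne_eq, hc, not_false_eq_true, if_true, key]
        simp [flushIf, h, hB, ht, String.ofList_toList]
    · rw [loopA_cons, if_neg h]
      rw [ih]
      simp [h, flushIf, String.toList_push]

-- ===== VERDICT (by name: the statement is the Claim_ definition above) =====
theorem tokenize_ws_py_spec : Claim_equal_tokenize_ws_py := by
  intro s _
  unfold Spec_tokenize_ws_py tokenize_ws_py tokenize_ws_py_alt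
  rw [loopA_eq, tokWsB_unfold s.toList]
  simp
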